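-- pv_equiv track=rewrite | github.com/itsecd/application-programming-labs-2025 | lab1.py | count_domains
-- ===== SOURCE A (Python) =====
-- from typing import List, Dict, Tuple
--
-- def count_domains(domains: List[str]) -> Dict[str, int]:
--     """
--     Подсчитывает количество каждого домена.
--
--     Args:
--         domains (List[str]): Список доменов
--
--     Returns:
--         Dict[str, int]: Словарь с количеством каждого домена
--     """
--     domain_count = {}
--     for domain in domains:
--         if domain in domain_count:
--             domain_count[domain] += 1
--         else:
--             domain_count[domain] = 1
--     return domain_count
-- ===== SOURCE B (Python) =====
-- from typing import List, Dict
--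
-- def count_domains(domains: List[str]) -> Dict[str, int]:
--     # Count per distinct domain: dedup preserving first-occurrence order,
--     # then one counting pass of the whole list per distinct key.
--     return {d: domains.count(d) for d in dict.fromkeys(domains)}
-- ===== Notes on version B (the rewrite author's own statement) =====
-- stated objective: alternative
-- what changed: Replaces the single-pass hash-table accumulation (membership test + increment per element) with an ordered dedup of the keys followed by a full list.count pass per distinct key.
import Mathlib
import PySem

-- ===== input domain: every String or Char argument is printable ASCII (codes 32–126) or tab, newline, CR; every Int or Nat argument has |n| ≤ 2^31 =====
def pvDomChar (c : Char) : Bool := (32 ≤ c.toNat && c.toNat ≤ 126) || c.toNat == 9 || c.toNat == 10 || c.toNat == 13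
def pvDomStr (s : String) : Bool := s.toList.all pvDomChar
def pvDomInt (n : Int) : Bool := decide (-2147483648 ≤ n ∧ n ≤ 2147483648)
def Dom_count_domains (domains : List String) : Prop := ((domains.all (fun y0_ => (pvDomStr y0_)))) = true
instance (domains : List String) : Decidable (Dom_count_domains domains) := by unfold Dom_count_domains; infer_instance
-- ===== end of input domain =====

-- B replaces A's single-pass hash accumulation by an ordered dedup of the keys
-- plus one list.count pass per distinct key (alternative decomposition, not faster).

-- ===== PORT A =====
-- for domain in domains: if domain in d: d[domain] += 1 else: d[domain] = 1
def count_domains (domains : List String) : List (String × Int) :=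
  (domains.foldl
    (fun d domain =>
      if d.contains domain then d.insert domain (d.getD domain 0 + 1)
      else d.insert domain 1)
    PySem.Dict.empty).items

-- ===== PORT B =====
-- {d: domains.count(d) for d in dict.fromkeys(domains)}
def count_domains_alt (domains : List String) : List (String × Int) :=
  (PySem.List.dedup domains).map (fun d => (d, (domains.count d : Int)))

-- ===== PRECONDITION & SPEC =====
def Spec_count_domains (domains : List String) (out : List (String × Int)) : Prop := out = count_domains_alt domains
instance (domains : List String) (out : List (String × Int)) : Decidable (Spec_count_domains domains out) := by unfold Spec_count_domains; infer_instance

-- ===== CLAIM (what is proved, stated in full; the proofs are below) =====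
def Claim_equal_count_domains : Prop := ∀ (domains : List String), Dom_count_domains domains → Spec_count_domains domains (count_domains domains)

-- ===== LEMMAS AND PROOFS =====

-- A's branching step is the unconditional Counter step: when the key is absent its getD is 0.
theorem count_domains_step_eq (d : PySem.Dict String Int) (x : String) :
    (if d.contains x then d.insert x (d.getD x 0 + 1) else d.insert x 1)
      = d.insert x (d.getD x 0 + 1) := by
  split_ifs with h
  · rfl
  · simp [PySem.Dict.getD_of_not_contains, h]

theorem count_domains_eq_counter (domains : List String) :
    count_domains domains = (PySem.Dict.counter domains).items := by
  unfold count_domains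
  rw [show (fun (d : PySem.Dict String Int) domain =>
        if d.contains domain then d.insert domain (d.getD domain 0 + 1)
        else d.insert domain 1)
      = fun d x => d.insert x (d.getD x 0 + 1) from
    funext fun d => funext fun x => count_domains_step_eq d x]
  rw [PySem.Dict.foldl_insert_getD_add_one_eq_counter]

-- ===== VERDICT (by name: the statement is the Claim_ definition above) =====
theorem count_domains_spec : Claim_equal_count_domains := by
  intro domains _
  show count_domains domains = count_domains_alt domains
  rw [count_domains_eq_counter, PySem.Dict.items_counter]
  simp [count_domains_alt]
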